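-- pv_equiv track=rewrite | github.com/EndeavoringOrb/tensor_graphs | tensor_graphs/compiler/shape_inference.py | _prod_shape
-- ===== SOURCE A (Python) =====
-- from typing import List, Dict, Any, Tuple, Optional, Callable
--
-- def _prod_shape(shape: Tuple[Optional[int], ...]) -> Optional[int]:
--     """Product of shape dimensions. Returns None if any dimension is None."""
--     if not shape:
--         return 1
--     result = 1
--     for d in shape:
--         if d is None:
--             return None
--         result *= d
--     return result
-- ===== SOURCE B (Python) =====
-- from typing import Tuple, Optional
--
--
-- def _prod_list(xs):
--     """Product of a list of ints by halving (divide and conquer); empty product = 1."""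
--     if not xs:
--         return 1
--     if len(xs) == 1:
--         return xs[0]
--     mid = len(xs) // 2
--     return _prod_list(xs[:mid]) * _prod_list(xs[mid:])
--
--
-- def _prod_shape(shape: Tuple[Optional[int], ...]) -> Optional[int]:
--     """Product of shape dimensions. Returns None if any dimension is None."""
--     if None in shape:
--         return None
--     return _prod_list(list(shape))
-- ===== Notes on version B (the rewrite author's own statement) =====
-- stated objective: alternative
-- what changed: Replaces A's single fused early-exit loop (accumulator, mid-loop return None) with two separate passes: a 'None in shape' membership test, then the product computed by divide-and-conquer halving recursion instead of a left-to-right accumulator; the empty-shape guard disappears because the empty product is 1.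
import Mathlib
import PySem

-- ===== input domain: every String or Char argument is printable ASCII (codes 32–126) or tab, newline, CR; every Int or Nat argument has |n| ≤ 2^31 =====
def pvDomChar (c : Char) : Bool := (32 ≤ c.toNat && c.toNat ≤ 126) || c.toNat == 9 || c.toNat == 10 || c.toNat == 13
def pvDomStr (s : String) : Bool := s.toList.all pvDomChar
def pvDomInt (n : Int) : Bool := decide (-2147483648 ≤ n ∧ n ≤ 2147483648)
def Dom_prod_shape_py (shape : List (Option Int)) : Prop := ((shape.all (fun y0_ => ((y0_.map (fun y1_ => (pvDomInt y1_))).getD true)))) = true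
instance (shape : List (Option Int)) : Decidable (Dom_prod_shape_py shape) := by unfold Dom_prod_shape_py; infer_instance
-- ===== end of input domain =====

-- B replaces A's fused early-exit accumulator loop with two passes: a None-membership test, then a divide-and-conquer product (alternative decomposition, same O(n) cost).

-- ===== PORT A =====
-- literal port of A: fused loop with accumulator and early return on None
def pvLoopA : Int → List (Option Int) → Option Int
  | result, [] => some result
  | _, none :: _ => none
  | result, some d :: rest => pvLoopA (result * d) rest

def prod_shape_py (shape : List (Option Int)) : Option Int :=
  if shape = [] then some 1 else pvLoopA 1 shape

-- ===== PORT B =====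
-- B: membership pass, then divide-and-conquer product (xs[:mid]/xs[mid:] with 0 ≤ mid ≤ len
-- are exactly take/drop; after the membership check every element is `some`, read by getD 1;
-- for a singleton xs[0] is its head)
def pvProdList (xs : List (Option Int)) : Int :=
  if h1 : xs = [] then 1
  else if h2 : xs.length = 1 then (xs.headD none).getD 1
  else
    pvProdList (xs.take (xs.length / 2)) * pvProdList (xs.drop (xs.length / 2))
termination_by xs.length
decreasing_by
  · have : xs.length ≠ 0 := by simpa using h1
    simp only [List.length_take]; omega
  · have : xs.length ≠ 0 := by simpa using h1
    simp only [List.length_drop]; omega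

def prod_shape_py_alt (shape : List (Option Int)) : Option Int :=
  if none ∈ shape then none else some (pvProdList shape)

-- ===== PRECONDITION & SPEC =====
def Spec_prod_shape_py (shape : List (Option Int)) (out : Option Int) : Prop := out = prod_shape_py_alt shape
instance (shape : List (Option Int)) (out : Option Int) : Decidable (Spec_prod_shape_py shape out) := by unfold Spec_prod_shape_py; infer_instance

-- ===== CLAIM (what is proved, stated in full; the proofs are below) =====
def Claim_equal_prod_shape_py : Prop := ∀ (shape : List (Option Int)), Dom_prod_shape_py shape → Spec_prod_shape_py shape (prod_shape_py shape)

-- ===== LEMMAS AND PROOFS =====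
-- simple structural product, the bridge between the two ports
def pvProdSimple : List (Option Int) → Int
  | [] => 1
  | x :: rest => x.getD 1 * pvProdSimple rest

theorem pvProdSimple_append (a b : List (Option Int)) :
    pvProdSimple (a ++ b) = pvProdSimple a * pvProdSimple b := by
  induction a with
  | nil => simp [pvProdSimple]
  | cons x t ih => simp [pvProdSimple, ih, mul_assoc]

theorem pvProdList_eq (xs : List (Option Int)) : pvProdList xs = pvProdSimple xs := by
  rw [pvProdList]
  split_ifs with h1 h2
  · simp [h1, pvProdSimple]
  · match xs, h2 with
    | [x], _ => simp [pvProdSimple]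
  · have h3 : pvProdList (xs.take (xs.length / 2)) = pvProdSimple (xs.take (xs.length / 2)) :=
      pvProdList_eq (xs.take (xs.length / 2))
    have h4 : pvProdList (xs.drop (xs.length / 2)) = pvProdSimple (xs.drop (xs.length / 2)) :=
      pvProdList_eq (xs.drop (xs.length / 2))
    rw [h3, h4, ← pvProdSimple_append, List.take_append_drop]
termination_by xs.length
decreasing_by
  · have : xs.length ≠ 0 := by simpa using h1
    simp only [List.length_take]; omega
  · have : xs.length ≠ 0 := by simpa using h1
    simp only [List.length_drop]; omega

theorem pvLoopA_eq (shape : List (Option Int)) : ∀ r : Int,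
    pvLoopA r shape = if none ∈ shape then none else some (r * pvProdSimple shape) := by
  induction shape with
  | nil => intro r; simp [pvLoopA, pvProdSimple]
  | cons x rest ih =>
    intro r
    cases x with
    | none => simp [pvLoopA]
    | some d =>
      simp only [pvLoopA, ih, pvProdSimple, List.mem_cons]
      split_ifs with h h' h'
      · rfl
      · simp at h'; tauto
      · simp at h; tauto
      · simp [Option.getD, mul_assoc]

-- ===== VERDICT (by name: the statement is the Claim_ definition above) =====
theorem prod_shape_py_spec : Claim_equal_prod_shape_py := by
  intro shape _
  unfold Spec_prod_shape_py prod_shape_py prod_shape_py_alt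
  cases shape with
  | nil => simp [pvProdList]
  | cons x rest => simp [pvLoopA_eq, pvProdList_eq]
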